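-- pv_equiv track=rewrite | github.com/devgi/nand2tetris | hack_assember/src/hack_assembler/assembler.py | resolve_value
-- ===== SOURCE A (Python) =====
-- VARIABLE_BEGIN_OFFSET = 0x10
--
-- def resolve_value(value, symbol_table, variable_table):
--     if value in symbol_table:
--         # Check if the value is symbol.
--         return symbol_table[value]
--
--     elif value in variable_table:
--         # Check if the value is pre declared variable
--         return variable_table[value]
--     else:
--         # Try to evaluate the value as integer.
--         # Don't support negative values at all.
--         try:
--             return int(value)
--         except ValueError:
--             # Declare this value as variable.
--             variable_offset = VARIABLE_BEGIN_OFFSET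
--             declared_variable_offset = variable_table.values()
--             while variable_offset in declared_variable_offset:
--                 variable_offset += 1
--
--             # Set the symbol to be at this free offset
--             variable_table[value] = variable_offset
--             return variable_offset
-- ===== SOURCE B (Python) =====
-- VARIABLE_BEGIN_OFFSET = 0x10
--
-- def resolve_value(value, symbol_table, variable_table):
--     # One loop over both tables replaces the if/elif chain.
--     for table in (symbol_table, variable_table):
--         if value in table:
--             return table[value]
--     try:
--         return int(value)
--     except ValueError:
--         pass
--     # First free slot >= base: sort the distinct used offsets >= base, then
--     # one scan finds the first gap.
--     candidate = VARIABLE_BEGIN_OFFSET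
--     for used in sorted(set(v for v in variable_table.values() if v >= VARIABLE_BEGIN_OFFSET)):
--         if used != candidate:
--             break
--         candidate += 1
--     variable_table[value] = candidate
--     return candidate
-- ===== Notes on version B (the rewrite author's own statement) =====
-- stated objective: alternative
-- what changed: The lookup dispatch becomes a single loop over the two tables, and the free-offset search replaces A's repeated 'while offset in values' membership probing with a sort of the distinct used offsets >= the base followed by a single gap scan.
import Mathlib
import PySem

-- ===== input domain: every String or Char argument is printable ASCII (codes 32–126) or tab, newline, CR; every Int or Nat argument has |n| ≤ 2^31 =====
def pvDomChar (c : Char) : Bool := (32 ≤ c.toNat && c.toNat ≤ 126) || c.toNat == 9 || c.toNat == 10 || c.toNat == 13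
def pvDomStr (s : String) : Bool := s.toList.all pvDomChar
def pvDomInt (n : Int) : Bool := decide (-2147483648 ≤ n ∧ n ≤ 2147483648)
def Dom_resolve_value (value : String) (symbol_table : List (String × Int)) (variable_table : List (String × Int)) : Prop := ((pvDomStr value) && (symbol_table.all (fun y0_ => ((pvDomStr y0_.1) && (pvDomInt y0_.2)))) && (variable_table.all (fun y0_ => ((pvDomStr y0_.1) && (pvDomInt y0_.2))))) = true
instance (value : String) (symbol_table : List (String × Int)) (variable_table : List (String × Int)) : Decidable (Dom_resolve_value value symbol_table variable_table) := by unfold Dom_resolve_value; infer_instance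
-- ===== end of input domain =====

-- B turns the if/elif lookup chain into one loop over the two tables and replaces A's
-- repeated 'while offset in values' probing with a sort of the distinct used offsets
-- >= the base followed by a single gap scan (objective: alternative).
-- A (and B) also mutate variable_table in the fallback branch; the equivalence proved
-- here is about the RETURN value only (B performs the same mutation in Python).

-- ===== PORT A =====
-- the 'while variable_offset in declared_variable_offset: variable_offset += 1' loop,
-- with fuel for totality (the loop runs at most (#distinct used values)+1 times)
def pvLoopA (used : List Int) (offset : Int) : Nat → Int
  | 0 => offset
  | fuel+1 => if offset ∈ used then pvLoopA used (offset + 1) fuel else offset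

def resolve_value (value : String) (symbol_table : List (String × Int)) (variable_table : List (String × Int)) : Int :=
  match (PySem.Dict.ofList symbol_table).get? value with
  | some v => v
  | none =>
    match (PySem.Dict.ofList variable_table).get? value with
    | some v => v
    | none =>
      match PySem.Int.ofStr? value with
      | some n => n
      | none =>
        let declared := (PySem.Dict.ofList variable_table).values
        pvLoopA declared 16 (declared.length + 1)

-- ===== PORT B =====
-- 'for table in (symbol_table, variable_table): if value in table: return table[value]'
def pvFirstHit (value : String) : List (List (String × Int)) → Option Int
  | [] => none
  | t :: rest =>
    match (PySem.Dict.ofList t).get? value with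
    | some v => some v
    | none => pvFirstHit value rest

-- 'for used in L: if used != candidate: break; candidate += 1; return candidate'
def pvGapScan (cand : Int) : List Int → Int
  | [] => cand
  | v :: rest => if v ≠ cand then cand else pvGapScan (cand + 1) rest

def resolve_value_alt (value : String) (symbol_table : List (String × Int)) (variable_table : List (String × Int)) : Int :=
  (pvFirstHit value [symbol_table, variable_table]).getD
    ((PySem.Int.ofStr? value).getD
      (pvGapScan 16
        (PySem.List.sorted
          (PySem.Set.ofList (((PySem.Dict.ofList variable_table).values).filter (fun v => 16 ≤ v)))
          (fun x => x) false)))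

-- ===== PRECONDITION & SPEC =====
def Spec_resolve_value (value : String) (symbol_table : List (String × Int)) (variable_table : List (String × Int)) (out : Int) : Prop := out = resolve_value_alt value symbol_table variable_table
instance (value : String) (symbol_table : List (String × Int)) (variable_table : List (String × Int)) (out : Int) : Decidable (Spec_resolve_value value symbol_table variable_table out) := by unfold Spec_resolve_value; infer_instance

-- ===== CLAIM (what is proved, stated in full; the proofs are below) =====
def Claim_equal_resolve_value : Prop := ∀ (value : String) (symbol_table : List (String × Int)) (variable_table : List (String × Int)), Dom_resolve_value value symbol_table variable_table → Spec_resolve_value value symbol_table variable_table (resolve_value value symbol_table variable_table)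

-- ===== LEMMAS AND PROOFS =====

-- A's loop, given enough fuel, returns the least offset ≥ its start not in `used`.
theorem pvLoopA_spec (used : List Int) : ∀ (fuel : Nat) (offset : Int),
    (used.toFinset.filter (fun x => offset ≤ x)).card < fuel →
    pvLoopA used offset fuel ∉ used ∧ offset ≤ pvLoopA used offset fuel ∧
      ∀ m, offset ≤ m → m < pvLoopA used offset fuel → m ∈ used := by
  intro fuel
  induction fuel with
  | zero => intro offset h; omega
  | succ fuel ih =>
    intro offset h
    simp only [pvLoopA]
    by_cases hm : offset ∈ used
    · simp only [hm, if_true]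
      have hset : used.toFinset.filter (fun x => offset + 1 ≤ x)
          = (used.toFinset.filter (fun x => offset ≤ x)).erase offset := by
        ext x
        simp only [Finset.mem_filter, Finset.mem_erase, List.mem_toFinset]
        constructor
        · intro ⟨hx, hle⟩; exact ⟨by omega, hx, by omega⟩
        · intro ⟨hne, hx, hle⟩; exact ⟨hx, by omega⟩
      have hcard : (used.toFinset.filter (fun x => offset + 1 ≤ x)).card
          < (used.toFinset.filter (fun x => offset ≤ x)).card := by
        rw [hset]
        exact Finset.card_erase_lt_of_mem (by
          simp only [Finset.mem_filter, List.mem_toFinset]; exact ⟨hm, le_refl _⟩)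
      obtain ⟨h1, h2, h3⟩ := ih (offset + 1) (by omega)
      refine ⟨h1, by omega, ?_⟩
      intro m hm1 hm2
      by_cases he : m = offset
      · exact he ▸ hm
      · exact h3 m (by omega) hm2
    · rw [if_neg hm]
      exact ⟨hm, le_refl _, fun m h1 h2 => absurd (lt_of_le_of_lt h1 h2) (lt_irrefl _)⟩

-- B's gap scan over a strictly sorted list whose elements are all ≥ cand
-- returns the least value ≥ cand not in the list.
theorem pvGapScan_spec : ∀ (L : List Int) (cand : Int),
    L.Pairwise (· < ·) → (∀ x ∈ L, cand ≤ x) →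
    pvGapScan cand L ∉ L ∧ cand ≤ pvGapScan cand L ∧
      ∀ m, cand ≤ m → m < pvGapScan cand L → m ∈ L := by
  intro L
  induction L with
  | nil => intro cand _ _; simp [pvGapScan]
  | cons v rest ih =>
    intro cand hp hge
    have hpv : ∀ x ∈ rest, v < x := by
      intro x hx; exact (List.pairwise_cons.mp hp).1 x hx
    simp only [pvGapScan, ne_eq, ite_not]
    by_cases hv : v = cand
    · simp only [hv, if_true]
      obtain ⟨h1, h2, h3⟩ := ih (cand + 1) (List.pairwise_cons.mp hp).2
        (fun x hx => by have := hpv x hx; omega)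
      refine ⟨?_, by omega, ?_⟩
      · simp only [List.mem_cons, not_or]
        exact ⟨by omega, h1⟩
      · intro m hm1 hm2
        by_cases he : m = cand
        · simp [he]
        · exact List.mem_cons_of_mem _ (h3 m (by omega) hm2)
    · simp only [hv, if_false]
      have hcv : cand < v := lt_of_le_of_ne (hge v (List.mem_cons_self)) (fun h => hv h.symm)
      refine ⟨?_, le_refl _, fun m h1 h2 => by omega⟩
      simp only [List.mem_cons, not_or]
      exact ⟨by omega, fun hc => by have := hpv cand hc; omega⟩

-- the two fallback searches agree
theorem fallback_eq (used : List Int) :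
    pvLoopA used 16 (used.length + 1)
      = pvGapScan 16 (PySem.List.sorted (PySem.Set.ofList (used.filter (fun v => 16 ≤ v))) (fun x => x) false) := by
  set L := PySem.List.sorted (PySem.Set.ofList (used.filter (fun v => 16 ≤ v))) (fun x => x) false with hL
  have hmemL : ∀ x, x ∈ L ↔ (x ∈ used ∧ 16 ≤ x) := by
    intro x
    rw [hL, PySem.List.mem_sorted, PySem.Set.mem_ofList, List.mem_filter]
    simp
  have hpair : L.Pairwise (· < ·) := PySem.List.sorted_ofList_pairwise_lt _
  obtain ⟨a1, a2, a3⟩ := pvLoopA_spec used (used.length + 1) 16 (by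
    calc (used.toFinset.filter (fun x => (16:Int) ≤ x)).card
        ≤ used.toFinset.card := Finset.card_filter_le _ _
      _ ≤ used.length := used.toFinset_card_le
      _ < used.length + 1 := by omega)
  obtain ⟨b1, b2, b3⟩ := pvGapScan_spec L 16 hpair (fun x hx => ((hmemL x).mp hx).2)
  set ra := pvLoopA used 16 (used.length + 1)
  set rb := pvGapScan 16 L
  rcases lt_trichotomy ra rb with h | h | h
  · exact absurd (((hmemL ra).mp (b3 ra a2 h)).1) a1
  · exact h
  · exact absurd ((hmemL rb).mpr ⟨a3 rb b2 h, b2⟩) b1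

-- ===== VERDICT (by name: the statement is the Claim_ definition above) =====
theorem resolve_value_spec : Claim_equal_resolve_value := by
  intro value symbol_table variable_table _
  unfold Spec_resolve_value resolve_value resolve_value_alt
  simp only [pvFirstHit]
  cases (PySem.Dict.ofList symbol_table).get? value with
  | some v => rfl
  | none =>
    cases (PySem.Dict.ofList variable_table).get? value with
    | some v => rfl
    | none =>
      cases PySem.Int.ofStr? value with
      | some n => rfl
      | none => simpa using fallback_eq _
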